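-- pv_equiv track=rewrite | github.com/cpt-r3tr0/hakerrank-mathematics | Number Theory/DegreeOfAnAlgebraicNumber.py | mindegree
-- ===== SOURCE A (Python) =====
-- MAXA = 10**7
--
-- def mindegree(a):
--     factors = [set(factoroddpow(item)) for item in a]
--     adjoins = 0
--     for i, factor in enumerate(factors):
--         if len(factor)==0:
--             continue
--         sample = next(iter(factor), None)
--         for otherfactor in factors[i+1:]:
--             if sample in otherfactor:
--                 otherfactor ^= factor
--         adjoins += 1
--     return 1 << adjoins
--
-- def allprimes(upto):
--     primes = []
--     seive = [True] * (upto+1)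
--     for i in range(2, upto+1):
--         if seive[i]:
--             primes.append(i)
--             for j in range(i*i, upto+1, i):
--                 seive[j] = False
--     return primes
--
-- def factoroddpow(n, primelist = allprimes(int(MAXA**0.5))):
--     ans = []
--     for prime in primelist:
--         if n % prime == 0:
--             deg = 0
--             while n % prime == 0:
--                 n //= prime
--                 deg += 1
--             if deg & 1 == 1:
--                 ans.append(prime)
--     if n > 1:
--         ans.append(n)
--     return ans
-- ===== SOURCE B (Python) =====
-- def mindegree(a):
--     # GF(2) rank via a pivot-keyed reduced basis; factor rows come from plain
--     # trial division by every d up to 3162 (no sieve / precomputed prime list: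
--     # a composite trial divisor can never divide once its prime factors have
--     # been removed), instead of A's in-place forward elimination over a row list.
--     basis = {}  # pivot prime -> reduced vector (set of primes)
--     for item in a:
--         s = oddprimeset(item)
--         for p, v in basis.items():
--             if p in s:
--                 s = s ^ v
--         if s:
--             p = min(s)
--             basis = {q: (w ^ s if p in w else w) for q, w in basis.items()}
--             basis[p] = s
--     return 1 << len(basis)
--
-- def oddprimeset(n):
--     # primes (<= 3162) with odd exponent in n, plus the leftover cofactor if > 1
--     s = set()
--     for d in range(2, 3163):
--         odd = False
--         while n % d == 0:
--             n //= d
--             odd = not odd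
--         if odd:
--             s.add(d)
--     if n > 1:
--         s.add(n)
--     return s
-- ===== Notes on version B (the rewrite author's own statement) =====
-- stated objective: alternative
-- what changed: A builds a sieve of Eratosthenes, factors each item over the resulting prime list, and does in-place forward Gaussian elimination XOR-ing each row's pivot out of all later rows; B factors by plain trial division over every divisor 2..3162 (no sieve or prime list, since a composite trial divisor can never divide once its prime factors are removed) and maintains a pivot-keyed reduced basis dictionary, fully reducing each incoming row and re-reducing stored vectors when a new pivot appears.
import Mathlib
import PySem

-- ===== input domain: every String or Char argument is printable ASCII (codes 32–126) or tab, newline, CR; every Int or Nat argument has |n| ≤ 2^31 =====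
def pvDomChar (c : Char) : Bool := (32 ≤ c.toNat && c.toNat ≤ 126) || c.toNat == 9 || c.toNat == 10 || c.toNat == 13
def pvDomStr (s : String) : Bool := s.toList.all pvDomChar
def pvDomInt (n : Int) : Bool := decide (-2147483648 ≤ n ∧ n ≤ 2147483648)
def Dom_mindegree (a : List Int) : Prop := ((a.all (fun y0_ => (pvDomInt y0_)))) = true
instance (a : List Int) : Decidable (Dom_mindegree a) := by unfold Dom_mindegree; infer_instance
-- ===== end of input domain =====

-- B replaces A's sieve + prime-list factoring by plain trial division over ALL divisors
-- 2..3162, and A's in-place forward elimination over the row list by a pivot-keyed reduced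
-- basis dictionary (alternative algorithm, same exact result; no speed claim).

-- ===== PORT A =====
-- allprimes(upto): sieve of Eratosthenes, transliterated (seive list, pyRange loops)
def allprimesP (upto : Int) : List Int :=
  ((PySem.List.pyRange 2 (upto + 1) 1).foldl
    (fun (acc : List Int × List Bool) i =>
      if PySem.List.pyGetD acc.2 i false then
        (acc.1 ++ [i],
         (PySem.List.pyRange (i * i) (upto + 1) i).foldl
           (fun sv j => PySem.List.pySetD sv j false) acc.2)
      else acc)
    ([], List.replicate (upto + 1).toNat true)).1

-- default argument primelist = allprimes(int(MAXA**0.5)); int((10**7)**0.5) = 3162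
-- (a module-load constant: the float sqrt of 10**7 is 3162.277…, truncated by int())
def pvPrimelist : List Int := allprimesP 3162

-- while n % prime == 0: n //= prime; deg += 1 — fuel recursion; 64 steps suffice for any
-- n ≠ 0 with |n| ≤ 2^31 divided by prime ≥ 2 (n = 0, where Python loops forever, is
-- outside Pre_mindegree)
def divloop : Nat → Int → Int → Int → Int × Int
  | 0, n, _, deg => (n, deg)
  | fuel + 1, n, prime, deg =>
    if PySem.Int.mod n prime == 0 then divloop fuel (PySem.Int.floordiv n prime) prime (deg + 1)
    else (n, deg)

def factoroddpow (n : Int) : List Int :=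
  let r := pvPrimelist.foldl
    (fun (acc : List Int × Int) prime =>
      if PySem.Int.mod acc.2 prime == 0 then
        let nd := divloop 64 acc.2 prime 0
        if PySem.Int.band nd.2 1 == 1 then (acc.1 ++ [prime], nd.1) else (acc.1, nd.1)
      else acc)
    ([], n)
  if r.2 > 1 then r.1 ++ [r.2] else r.1

-- A's main loop over `factors`: the sample pivot of each nonempty row is XORed out of every
-- later row containing it ('otherfactor ^= factor'); sample = next(iter(factor)) is modelled
-- as the Set's first element (the RETURNED value is pivot-choice independent — exactly what
-- the equivalence theorem below proves)
def loopA : List (PySem.Set Int) → Nat → Nat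
  | [], adjoins => adjoins
  | factor :: rest, adjoins =>
    if PySem.Set.len factor == 0 then loopA rest adjoins
    else
      loopA (rest.map (fun o =>
        if PySem.Set.contains o factor.headI then PySem.Set.symmDiff o factor else o))
        (adjoins + 1)
termination_by rows _ => rows.length
decreasing_by all_goals simp [List.length_map]

def mindegree (a : List Int) : Int :=
  (1 : Int) <<< loopA (a.map (fun item => PySem.Set.ofList (factoroddpow item))) 0

-- ===== PORT B =====
-- B's inner loop: odd = False; while n % d == 0: n //= d; odd = not odd  (fuel recursion,
-- 64 steps suffice exactly as for A's divloop; n = 0 is outside Pre_mindegree)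
def divOddB : Nat → Int → Int → Bool → Int × Bool
  | 0, n, _, odd => (n, odd)
  | fuel + 1, n, d, odd =>
    if PySem.Int.mod n d == 0 then divOddB fuel (PySem.Int.floordiv n d) d (!odd)
    else (n, odd)

-- primes (<= 3162) with odd exponent in n, plus the leftover cofactor if > 1:
-- trial division by EVERY d in range(2, 3163) — no sieve, no prime list
def oddprimeset (n : Int) : PySem.Set Int :=
  let r := (PySem.List.pyRange 2 3163 1).foldl
    (fun (acc : PySem.Set Int × Int) d =>
      let ne := divOddB 64 acc.2 d false
      (if ne.2 then PySem.Set.add acc.1 d else acc.1, ne.1))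
    (PySem.Set.empty, n)
  if r.2 > 1 then PySem.Set.add r.1 r.2 else r.1

-- reduce s fully against the basis: for p, v in basis.items(): if p in s: s = s ^ v
def reduceRow (basis : List (Int × PySem.Set Int)) (s : PySem.Set Int) : PySem.Set Int :=
  basis.foldl (fun s e => if PySem.Set.contains s e.1 then PySem.Set.symmDiff s e.2 else s) s

-- for item in a: … — basis is the dict pivot → vector (assoc list in insertion order);
-- the comprehension rebuilds the old entries re-reduced, inserting the fresh pivot appends
def loopB : List Int → List (Int × PySem.Set Int) → List (Int × PySem.Set Int)
  | [], basis => basis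
  | item :: rest, basis =>
    let s := reduceRow basis (oddprimeset item)
    if PySem.Set.len s == 0 then loopB rest basis
    else
      let p := (PySem.List.min? s (fun x => x)).getD 0   -- min(s); s is nonempty here
      loopB rest
        ((basis.map (fun e =>
            (e.1, if PySem.Set.contains e.2 p then PySem.Set.symmDiff e.2 s else e.2)))
          ++ [(p, s)])

def mindegree_alt (a : List Int) : Int :=
  (1 : Int) <<< (loopB a []).length

-- ===== PRECONDITION & SPEC =====
-- Pre_ excludes lists containing 0: there Python A never returns (the inner while-loop
-- runs forever, 0 % prime == 0 and 0 //= prime stays 0); B diverges there too (its trial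
-- division loops on 0 % d == 0 the same way). On every other input A returns normally.
def Pre_mindegree (a : List Int) : Prop := (0 : Int) ∉ a
instance (a : List Int) : Decidable (Pre_mindegree a) := by unfold Pre_mindegree; infer_instance
def pvWitness_mindegree : List Int := [6, 10, 15]

def Spec_mindegree (a : List Int) (out : Int) : Prop := out = mindegree_alt a
instance (a : List Int) (out : Int) : Decidable (Spec_mindegree a out) := by unfold Spec_mindegree; infer_instance

-- ===== CLAIM (what is proved, stated in full; the proofs are below) =====
def Claim_equal_mindegree : Prop := ∀ (a : List Int), Dom_mindegree a → Pre_mindegree a → Spec_mindegree a (mindegree a)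

-- ===== LEMMAS AND PROOFS =====

-- Overview: (1) both factor routines produce the same prime set for n ≠ 0, |n| ≤ 2^31 —
-- only primes ever divide the running n, because a composite trial divisor (of B's range,
-- or hypothetically of A's sieve output) has a smaller prime factor that was divided out
-- earlier; for A's sieve output we only need that it is a sorted sublist of the range
-- CONTAINING every prime < 3163; (2) both main loops compute 2^(GF(2)-rank of the rows):
-- each loop counts row i exactly when it is independent of rows 0..i-1, shown via the
-- noncomputable reference count `rg`.

-- ---- part 1: the factor routines agree ----

def stepA (acc : List Int × Int) (p : Int) : List Int × Int :=
  if PySem.Int.mod acc.2 p == 0 then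
    if PySem.Int.band (divloop 64 acc.2 p 0).2 1 == 1 then
      (acc.1 ++ [p], (divloop 64 acc.2 p 0).1)
    else (acc.1, (divloop 64 acc.2 p 0).1)
  else acc

def stepB (acc : List Int × Int) (d : Int) : List Int × Int :=
  let ne := divOddB 64 acc.2 d false
  (if ne.2 then PySem.Set.add acc.1 d else acc.1, ne.1)

def finishA (r : List Int × Int) : List Int := if r.2 > 1 then r.1 ++ [r.2] else r.1

def finishB (r : List Int × Int) : List Int :=
  if r.2 > 1 then PySem.Set.add r.1 r.2 else r.1

lemma factoroddpow_eq (n : Int) :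
    factoroddpow n = finishA (pvPrimelist.foldl stepA ([], n)) := rfl

lemma oddprimeset_eq (n : Int) :
    oddprimeset n = finishB ((PySem.List.pyRange 2 3163 1).foldl stepB ([], n)) := rfl

-- d has no divisor in [2, d)
def isPrB (d : Int) : Bool := (PySem.List.pyRange 2 d 1).all (fun k => !decide (k ∣ d))

-- every prime divisor < 3163 of the running n is still pending in L
def PInv (L : List Int) (n : Int) : Prop :=
  ∀ q : ℕ, q.Prime → (q : Int) < 3163 → (q : Int) ∣ n → (q : Int) ∈ L

lemma divloop_shift : ∀ (f : Nat) (n d deg : Int),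
    divloop f n d deg = ((divloop f n d 0).1, deg + (divloop f n d 0).2) := by
  intro f
  induction f with
  | zero => intro n d deg; simp [divloop]
  | succ f ih =>
    intro n d deg
    simp only [divloop]
    by_cases h : (PySem.Int.mod n d == 0) = true
    · rw [if_pos h, if_pos h, ih _ _ (deg + 1), ih _ _ (0 + 1)]
      simp only [Prod.mk.injEq, true_and]
      ring
    · rw [if_neg h, if_neg h]; simp

lemma divOddB_eq : ∀ (f : Nat) (n d : Int) (b : Bool),
    divOddB f n d b =
      ((divloop f n d 0).1, xor b (decide (PySem.Int.mod (divloop f n d 0).2 2 = 1))) := by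
  intro f
  induction f with
  | zero =>
    intro n d b
    show (n, b) = ((n, (0:Int)).1, xor b (decide (PySem.Int.mod (0:Int) 2 = 1)))
    norm_num [PySem.Int.mod]
  | succ f ih =>
    intro n d b
    by_cases h : (PySem.Int.mod n d == 0) = true
    · have hL : divOddB (f + 1) n d b = divOddB f (PySem.Int.floordiv n d) d (!b) := by
        simp only [divOddB, if_pos h]
      have hR : divloop (f + 1) n d 0 =
          ((divloop f (PySem.Int.floordiv n d) d 0).1,
            1 + (divloop f (PySem.Int.floordiv n d) d 0).2) := by
        simp only [divloop, if_pos h]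
        rw [divloop_shift f _ _ (0 + 1)]
        norm_num
      rw [hL, hR, ih]
      have hmod : ∀ m : Int, PySem.Int.mod m 2 = m % 2 :=
        fun m => PySem.Int.mod_eq_emod_of_pos (by norm_num)
      simp only [Prod.mk.injEq, hmod, true_and]
      generalize (divloop f (PySem.Int.floordiv n d) d 0).2 = e
      have h2 : (1 + e) % 2 = 1 ↔ ¬ (e % 2 = 1) := by omega
      by_cases hp : e % 2 = 1 <;> cases b <;> simp [hp, h2]
    · have hL : divOddB (f + 1) n d b = (n, b) := by
        simp only [divOddB, if_neg h]
      have hR : divloop (f + 1) n d 0 = (n, 0) := by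
        simp only [divloop, if_neg h]
      rw [hL, hR]
      norm_num [PySem.Int.mod]

lemma divloop_spec : ∀ (f : Nat) (n d : Int), 2 ≤ d → n ≠ 0 → n.natAbs < 2 ^ f →
    (divloop f n d 0).1 ∣ n ∧ (divloop f n d 0).1 ≠ 0 ∧ ¬ d ∣ (divloop f n d 0).1 ∧
      (divloop f n d 0).1.natAbs ≤ n.natAbs := by
  intro f
  induction f with
  | zero =>
    intro n d _ hn hb
    simp only [pow_zero, Nat.lt_one_iff, Int.natAbs_eq_zero] at hb
    exact absurd hb hn
  | succ f ih =>
    intro n d h2 hn hb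
    by_cases hdvd : d ∣ n
    · have hm : (PySem.Int.mod n d == 0) = true := by
        simp [PySem.Int.mod_eq_zero_iff_dvd, hdvd]
      obtain ⟨m, rfl⟩ := hdvd
      have hd0 : d ≠ 0 := by omega
      have hm0 : m ≠ 0 := fun h => hn (by simp [h])
      have hfd : PySem.Int.floordiv (d * m) d = m := by
        rw [PySem.Int.floordiv_eq_ediv_of_pos (by omega)]
        exact Int.mul_ediv_cancel_left m hd0
      have hstep : divloop (f + 1) (d * m) d 0 =
          ((divloop f m d 0).1, 0 + 1 + (divloop f m d 0).2) := by
        simp only [divloop, if_pos hm, hfd]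
        rw [divloop_shift f m d (0 + 1)]
      have habs : (d * m).natAbs = d.natAbs * m.natAbs := Int.natAbs_mul d m
      have hd2 : 2 ≤ d.natAbs := by omega
      have hmb : m.natAbs < 2 ^ f := by
        have h1 : 2 * m.natAbs ≤ d.natAbs * m.natAbs :=
          Nat.mul_le_mul_right _ hd2
        have h2' : (2:ℕ) ^ (f + 1) = 2 * 2 ^ f := by ring
        omega
      obtain ⟨ha, hb', hc, hd'⟩ := ih m d h2 hm0 hmb
      refine ⟨?_, ?_, ?_, ?_⟩
      · rw [hstep]; exact ha.mul_left d
      · rw [hstep]; exact hb'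
      · rw [hstep]; exact hc
      · rw [hstep]
        have : m.natAbs ≤ d.natAbs * m.natAbs := Nat.le_mul_of_pos_left _ (by omega)
        omega
    · have hm : (PySem.Int.mod n d == 0) = false := by
        simp [PySem.Int.mod_eq_zero_iff_dvd, hdvd]
      have hstep : divloop (f + 1) n d 0 = (n, 0) := by
        simp only [divloop, hm, Bool.false_eq_true, if_false]
      rw [hstep]
      exact ⟨dvd_refl n, hn, hdvd, le_refl _⟩

lemma stepA_no {ans : List Int} {n d : Int} (h : ¬ d ∣ n) : stepA (ans, n) d = (ans, n) := by
  simp [stepA, PySem.Int.mod_eq_zero_iff_dvd, h]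

lemma isPrB_iff {d : Int} : isPrB d = true ↔ ∀ k : Int, 2 ≤ k → k < d → ¬ k ∣ d := by
  simp [isPrB, PySem.List.mem_pyRange_one]

lemma small_divisor {d : Int} (h2 : 2 ≤ d) (hnp : isPrB d = false) :
    ∃ q : ℕ, q.Prime ∧ (q : Int) ∣ d ∧ (q : Int) < d := by
  have hex : ¬ ∀ k : Int, 2 ≤ k → k < d → ¬ k ∣ d := by
    rw [← isPrB_iff]; simp [hnp]
  push Not at hex
  obtain ⟨k, hk2, hkd, hkdvd⟩ := hex
  refine ⟨d.natAbs.minFac, Nat.minFac_prime (by omega), ?_, ?_⟩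
  · have h1 : (d.natAbs.minFac : Int) ∣ (d.natAbs : Int) :=
      Int.natCast_dvd_natCast.mpr (Nat.minFac_dvd _)
    rwa [Int.natAbs_of_nonneg (by omega)] at h1
  · have hkna : k.natAbs ∣ d.natAbs := Int.natAbs_dvd_natAbs.mpr hkdvd
    have hle : d.natAbs.minFac ≤ k.natAbs := Nat.minFac_le_of_dvd (by omega) hkna
    omega

lemma isPrB_prime {x : Int} (h2 : 2 ≤ x) (h : isPrB x = true) : x.natAbs.Prime := by
  rw [Nat.prime_def_lt]
  refine ⟨by omega, ?_⟩
  intro m hm hmdvd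
  by_contra hm1
  have hm2 : 2 ≤ m := by
    rcases Nat.lt_or_ge m 2 with hlt | hge
    · interval_cases m
      · simp at hmdvd; omega
      · omega
    · exact hge
  have hdvd : (m : Int) ∣ x := by
    have h1 : (m : Int) ∣ (x.natAbs : Int) := Int.natCast_dvd_natCast.mpr hmdvd
    rwa [Int.natAbs_of_nonneg (by omega)] at h1
  exact (isPrB_iff.mp h) m (by omega) (by omega) hdvd

lemma PInv_step {d : Int} {tail : List Int} {n n' : Int}
    (hinv : PInv (d :: tail) n) (hdvd : n' ∣ n) (hnd : ¬ d ∣ n') : PInv tail n' := by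
  intro q hq h3 hqd
  rcases List.mem_cons.mp (hinv q hq h3 (hqd.trans hdvd)) with heq | htl
  · exact absurd (heq ▸ hqd) hnd
  · exact htl

lemma stepA_div {ans : List Int} {n d : Int} (hm : d ∣ n) :
    ∃ ans', (ans' = ans ∨ ans' = ans ++ [d]) ∧
      stepA (ans, n) d = (ans', (divloop 64 n d 0).1) := by
  have hm' : (PySem.Int.mod n d == 0) = true := by
    simp [PySem.Int.mod_eq_zero_iff_dvd, hm]
  unfold stepA
  rw [if_pos hm']
  by_cases hband : (PySem.Int.band (divloop 64 n d 0).2 1 == 1) = true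
  · exact ⟨ans ++ [d], Or.inr rfl, by simp [hband]⟩
  · exact ⟨ans, Or.inl rfl, by simp [hband]⟩

-- a composite head never divides the running n: its smaller prime factor is not pending
lemma comp_no_dvd {d : Int} {tail : List Int} {n : Int}
    (hpw : (d :: tail).Pairwise (· < ·)) (h2 : 2 ≤ d) (h3 : d < 3163)
    (hp : isPrB d = false) (hinv : PInv (d :: tail) n) : ¬ d ∣ n := by
  intro hdvd
  obtain ⟨q, hq, hqd, hqlt⟩ := small_divisor h2 hp
  rcases List.mem_cons.mp (hinv q hq (by omega) (hqd.trans hdvd)) with heq | htl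
  · omega
  · have := (List.pairwise_cons.mp hpw).1 _ htl
    omega

lemma fold_filter : ∀ (L ans : List Int) (n : Int),
    L.Pairwise (· < ·) → (∀ d ∈ L, 2 ≤ d ∧ d < 3163) → n ≠ 0 → n.natAbs < 2 ^ 64 →
    PInv L n →
    L.foldl stepA (ans, n) = (L.filter isPrB).foldl stepA (ans, n) := by
  intro L
  induction L with
  | nil => intro ans n _ _ _ _ _; rfl
  | cons d tail ih =>
    intro ans n hpw hbd hn hb hinv
    have h2d := (hbd d (by simp)).1
    by_cases hp : isPrB d = true
    · rw [List.filter_cons_of_pos hp]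
      simp only [List.foldl_cons]
      by_cases hdvd : d ∣ n
      · obtain ⟨hdvd1, hne1, hnd1, hle1⟩ := divloop_spec 64 n d h2d hn hb
        obtain ⟨ans', _, hstep⟩ := stepA_div (ans := ans) hdvd
        rw [hstep]
        exact ih ans' _ hpw.of_cons (fun x hx => hbd x (by simp [hx])) hne1
          (lt_of_le_of_lt hle1 hb) (PInv_step hinv hdvd1 hnd1)
      · rw [stepA_no hdvd]
        exact ih ans n hpw.of_cons (fun x hx => hbd x (by simp [hx])) hn hb
          (PInv_step hinv (dvd_refl n) hdvd)
    · have hp' : isPrB d = false := by simpa using hp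
      have hdvd : ¬ d ∣ n := comp_no_dvd hpw h2d (hbd d (by simp)).2 hp' hinv
      rw [List.filter_cons_of_neg (by simp [hp']), List.foldl_cons, stepA_no hdvd]
      exact ih ans n hpw.of_cons (fun x hx => hbd x (by simp [hx])) hn hb
        (PInv_step hinv (dvd_refl n) hdvd)

lemma fold_AB : ∀ (L ans : List Int) (n : Int),
    L.Pairwise (· < ·) → (∀ d ∈ L, 2 ≤ d) → (∀ x ∈ ans, ∀ d ∈ L, x < d) →
    n ≠ 0 → n.natAbs < 2 ^ 64 →
    L.foldl stepB (ans, n) = L.foldl stepA (ans, n) := by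
  intro L
  induction L with
  | nil => intro ans n _ _ _ _ _; rfl
  | cons d tail ih =>
    intro ans n hpw h2 hbelow hn hb
    have h2d := h2 d (by simp)
    have hadd : PySem.Set.add ans d = ans ++ [d] := by
      have hni : d ∉ ans := fun hmem => lt_irrefl d (hbelow d hmem d (by simp))
      have hc : PySem.Set.contains ans d ≠ true :=
        fun h' => hni ((PySem.Set.contains_iff _ _).mp h')
      unfold PySem.Set.add
      rw [if_neg hc]
    have hBstep : stepB (ans, n) d =
        (if decide (PySem.Int.mod (divloop 64 n d 0).2 2 = 1) then PySem.Set.add ans d else ans,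
          (divloop 64 n d 0).1) := by
      unfold stepB
      rw [divOddB_eq]
      simp
    have hAstep : stepA (ans, n) d =
        (if decide (PySem.Int.mod (divloop 64 n d 0).2 2 = 1) then ans ++ [d] else ans,
          (if d ∣ n then (divloop 64 n d 0).1 else n)) := by
      by_cases hdvd : d ∣ n
      · have hm' : (PySem.Int.mod n d == 0) = true := by
          simp [PySem.Int.mod_eq_zero_iff_dvd, hdvd]
        unfold stepA
        rw [if_pos hm', if_pos hdvd]
        have hbeq : (PySem.Int.band (divloop 64 n d 0).2 1 == 1) =
            decide (PySem.Int.mod (divloop 64 n d 0).2 2 = 1) := by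
          rw [PySem.Int.band_one]
          exact Bool.beq_eq_decide_eq _ _
        rw [hbeq]
        split_ifs <;> rfl
      · have hloop : divloop 64 n d 0 = (n, 0) := by
          have hm' : (PySem.Int.mod n d == 0) = false := by
            simp [PySem.Int.mod_eq_zero_iff_dvd, hdvd]
          rw [show (64 : Nat) = 63 + 1 from rfl]
          simp only [divloop, hm', Bool.false_eq_true, if_false]
        rw [stepA_no hdvd, hloop, if_neg hdvd]
        norm_num [PySem.Int.mod]
    have hsame : stepB (ans, n) d = stepA (ans, n) d := by
      rw [hBstep, hAstep, hadd]
      by_cases hdvd : d ∣ n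
      · rw [if_pos hdvd]
      · have hloop : divloop 64 n d 0 = (n, 0) := by
          have hm' : (PySem.Int.mod n d == 0) = false := by
            simp [PySem.Int.mod_eq_zero_iff_dvd, hdvd]
          rw [show (64 : Nat) = 63 + 1 from rfl]
          simp only [divloop, hm', Bool.false_eq_true, if_false]
        rw [if_neg hdvd, hloop]
    simp only [List.foldl_cons]
    rw [hsame]
    -- the new state satisfies the inductive hypotheses
    by_cases hdvd : d ∣ n
    · obtain ⟨hdvd1, hne1, hnd1, hle1⟩ := divloop_spec 64 n d h2d hn hb
      obtain ⟨ans', hcase, hstep⟩ := stepA_div (ans := ans) hdvd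
      rw [hstep]
      refine ih ans' _ hpw.of_cons (fun x hx => h2 x (by simp [hx])) ?_ hne1
        (lt_of_le_of_lt hle1 hb)
      intro x hx d' hd'
      have hdd' : d < d' := (List.pairwise_cons.mp hpw).1 d' hd'
      rcases hcase with rfl | rfl
      · exact lt_trans (hbelow x hx d (by simp)) hdd'
      · rcases List.mem_append.mp hx with hxa | hxd
        · exact lt_trans (hbelow x hxa d (by simp)) hdd'
        · rw [List.mem_singleton.mp hxd]; exact hdd'
    · rw [stepA_no hdvd]
      exact ih ans n hpw.of_cons (fun x hx => h2 x (by simp [hx]))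
        (fun x hx d' hd' => hbelow x hx d' (by simp [hd'])) hn hb

lemma fold_props : ∀ (L ans : List Int) (n : Int),
    L.Pairwise (· < ·) → (∀ d ∈ L, 2 ≤ d ∧ d < 3163) → (∀ x ∈ ans, ∀ d ∈ L, x < d) →
    ans.Pairwise (· < ·) → (∀ x ∈ ans, x < 3163) → n ≠ 0 → n.natAbs < 2 ^ 64 → PInv L n →
    (L.foldl stepA (ans, n)).1.Pairwise (· < ·) ∧ (∀ x ∈ (L.foldl stepA (ans, n)).1, x < 3163) ∧
      (L.foldl stepA (ans, n)).2 ≠ 0 ∧ PInv [] (L.foldl stepA (ans, n)).2 := by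
  intro L
  induction L with
  | nil =>
    intro ans n _ _ _ hanspw hans3 hn _ hinv
    exact ⟨hanspw, hans3, hn, fun q hq h3 hqd => by simpa using hinv q hq h3 hqd⟩
  | cons d tail ih =>
    intro ans n hpw hbd hbelow hanspw hans3 hn hb hinv
    have h2d := (hbd d (by simp)).1
    have h3d := (hbd d (by simp)).2
    simp only [List.foldl_cons]
    by_cases hdvd : d ∣ n
    · obtain ⟨hdvd1, hne1, hnd1, hle1⟩ := divloop_spec 64 n d h2d hn hb
      obtain ⟨ans', hcase, hstep⟩ := stepA_div (ans := ans) hdvd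
      rw [hstep]
      have hbelow' : ∀ x ∈ ans', ∀ d' ∈ tail, x < d' := by
        intro x hx d' hd'
        have hdd' : d < d' := (List.pairwise_cons.mp hpw).1 d' hd'
        rcases hcase with rfl | rfl
        · exact lt_trans (hbelow x hx d (by simp)) hdd'
        · rcases List.mem_append.mp hx with hxa | hxd
          · exact lt_trans (hbelow x hxa d (by simp)) hdd'
          · rw [List.mem_singleton.mp hxd]; exact hdd'
      have hanspw' : ans'.Pairwise (· < ·) := by
        rcases hcase with rfl | rfl
        · exact hanspw
        · rw [List.pairwise_append]
          exact ⟨hanspw, by simp, fun x hx y hy => by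
            rw [List.mem_singleton.mp hy]; exact hbelow x hx d (by simp)⟩
      have hans3' : ∀ x ∈ ans', x < 3163 := by
        rcases hcase with rfl | rfl
        · exact hans3
        · intro x hx
          rcases List.mem_append.mp hx with hxa | hxd
          · exact hans3 x hxa
          · rw [List.mem_singleton.mp hxd]; exact h3d
      exact ih ans' _ hpw.of_cons (fun x hx => hbd x (by simp [hx])) hbelow' hanspw' hans3'
        hne1 (lt_of_le_of_lt hle1 hb) (PInv_step hinv hdvd1 hnd1)
    · rw [stepA_no hdvd]
      exact ih ans n hpw.of_cons (fun x hx => hbd x (by simp [hx]))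
        (fun x hx d' hd' => hbelow x hx d' (by simp [hd'])) hanspw hans3 hn hb
        (PInv_step hinv (dvd_refl n) hdvd)

-- the sieve fold with upto = 3162, named for the lemmas below
def sieveStep (acc : List Int × List Bool) (i : Int) : List Int × List Bool :=
  if PySem.List.pyGetD acc.2 i false then
    (acc.1 ++ [i],
     (PySem.List.pyRange (i * i) 3163 i).foldl
       (fun sv j => PySem.List.pySetD sv j false) acc.2)
  else acc

lemma allprimes_eq :
    allprimesP 3162 =
      ((PySem.List.pyRange 2 3163 1).foldl sieveStep ([], List.replicate 3163 true)).1 := by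
  have h1 : (3162 : Int) + 1 = 3163 := by norm_num
  rw [allprimesP, h1]
  have h2 : (3163 : Int).toNat = 3163 := rfl
  rw [h2]
  rfl

-- whatever the sieve appends is a sublist of the processed divisors
lemma sieve_acc : ∀ (l : List Int) (acc : List Int × List Bool),
    ∃ sl, List.Sublist sl l ∧ (l.foldl sieveStep acc).1 = acc.1 ++ sl := by
  intro l
  induction l with
  | nil => intro acc; exact ⟨[], List.Sublist.refl _, by simp⟩
  | cons i t ih =>
    intro acc
    simp only [List.foldl_cons]
    by_cases hg : PySem.List.pyGetD acc.2 i false = true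
    · obtain ⟨sl, hsub, heq⟩ := ih ((sieveStep acc i))
      refine ⟨i :: sl, List.cons_sublist_cons.mpr hsub, ?_⟩
      rw [heq]
      simp [sieveStep, hg]
    · obtain ⟨sl, hsub, heq⟩ := ih acc
      have hstep : sieveStep acc i = acc := by simp [sieveStep, hg]
      rw [hstep, heq]
      exact ⟨sl, List.sublist_cons_of_sublist i hsub, rfl⟩

-- the sieve's output is a sublist of range(2, 3163) …
lemma sieve_sublist : List.Sublist (allprimesP 3162) (PySem.List.pyRange 2 3163 1) := by
  rw [allprimes_eq]
  obtain ⟨sl, hsub, heq⟩ := sieve_acc (PySem.List.pyRange 2 3163 1) ([], List.replicate 3163 true)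
  rw [heq]
  simpa using hsub

-- pyGetD at an index outside the marked arithmetic progression is unchanged
lemma mark_keep : ∀ (ms : List Int) (sv : List Bool) (x : Int), 0 ≤ x → x ∉ ms →
    (∀ j ∈ ms, 0 ≤ j) →
    PySem.List.pyGetD (ms.foldl (fun sv j => PySem.List.pySetD sv j false) sv) x false =
      PySem.List.pyGetD sv x false := by
  intro ms
  induction ms with
  | nil => intro sv x _ _ _; rfl
  | cons j t ih =>
    intro sv x hx hnm hj0
    simp only [List.foldl_cons]
    rw [ih _ x hx (fun h => hnm (by simp [h])) (fun j hj => hj0 j (by simp [hj]))]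
    rw [PySem.List.pySetD_of_nonneg _ _ (hj0 j (by simp)),
      PySem.List.pyGetD_of_nonneg _ _ hx, PySem.List.pyGetD_of_nonneg _ _ hx]
    unfold List.getD
    rw [List.getElem?_set_ne]
    intro h
    exact hnm (by
      have hxj : x = j := by
        have h1 : (0:Int) ≤ j := hj0 j (by simp)
        omega
      simp [hxj])

-- primes are never marked: a marked index is a multiple j = i*k with k ≥ i ≥ 2
def svInv (sv : List Bool) : Prop :=
  ∀ q : ℕ, q.Prime → (q : Int) < 3163 → PySem.List.pyGetD sv (q : Int) false = true

lemma svInv_step (acc : List Int × List Bool) (i : Int) (h2 : 2 ≤ i) (hinv : svInv acc.2) :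
    svInv (sieveStep acc i).2 := by
  unfold sieveStep
  by_cases hg : PySem.List.pyGetD acc.2 i false = true
  · rw [if_pos hg]
    intro q hq h3
    have hnm : (q : Int) ∉ PySem.List.pyRange (i * i) 3163 i := by
      intro hmem
      rw [PySem.List.mem_pyRange_iff_of_pos (by omega)] at hmem
      obtain ⟨hlo, _, hdv⟩ := hmem
      have hiq' : i ∣ (q : Int) := by
        have h := dvd_add hdv (⟨i, rfl⟩ : i ∣ i * i)
        simpa using h
      have hna : i.natAbs ∣ q := by
        have := Int.natAbs_dvd_natAbs.mpr hiq'
        simpa using this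
      rcases Nat.Prime.eq_one_or_self_of_dvd hq _ hna with h1 | h1
      · omega
      · -- i = q, but q*q ≤ q forces q ≤ 1
        have hiq2 : i = (q : Int) := by omega
        nlinarith [hq.two_le]
    rw [mark_keep _ _ _ (by positivity) hnm]
    · exact hinv q hq h3
    · intro j hj
      rw [PySem.List.mem_pyRange_iff_of_pos (by omega)] at hj
      nlinarith [hj.1]
  · rw [if_neg hg]
    exact hinv

lemma mem_fold_mono : ∀ (l : List Int) (acc : List Int × List Bool) (x : Int),
    x ∈ acc.1 → x ∈ (l.foldl sieveStep acc).1 := by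
  intro l acc x hx
  obtain ⟨sl, _, heq⟩ := sieve_acc l acc
  rw [heq]
  exact List.mem_append_left _ hx

lemma sieve_climb : ∀ (l : List Int) (acc : List Int × List Bool),
    (∀ i ∈ l, 2 ≤ i) → svInv acc.2 →
    ∀ q : ℕ, q.Prime → (q : Int) < 3163 → (q : Int) ∈ l →
      (q : Int) ∈ (l.foldl sieveStep acc).1 := by
  intro l
  induction l with
  | nil => intro acc _ _ q _ _ hmem; simp at hmem
  | cons i t ih =>
    intro acc h2 hinv q hq h3 hmem
    simp only [List.foldl_cons]
    by_cases hiq : i = (q : Int)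
    · subst hiq
      have hg : PySem.List.pyGetD acc.2 (q : Int) false = true := hinv q hq h3
      have hstep : (sieveStep acc (q : Int)).1 = acc.1 ++ [(q : Int)] := by
        simp [sieveStep, hg]
      refine mem_fold_mono t _ _ ?_
      rw [hstep]
      simp
    · rcases List.mem_cons.mp hmem with heq | htl
      · exact absurd heq.symm hiq
      · exact ih (sieveStep acc i) (fun j hj => h2 j (by simp [hj]))
          (svInv_step acc i (h2 i (by simp)) hinv) q hq h3 htl

-- … that contains every prime < 3163
lemma sieve_complete : ∀ q : ℕ, q.Prime → (q : Int) < 3163 → (q : Int) ∈ allprimesP 3162 := by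
  intro q hq h3
  rw [allprimes_eq]
  refine sieve_climb _ _ ?_ ?_ q hq h3 ?_
  · intro i hi
    rw [PySem.List.mem_pyRange_one] at hi
    exact hi.1
  · intro p hp h3'
    rw [PySem.List.pyGetD_of_nonneg _ _ (by positivity)]
    unfold List.getD
    rw [List.getElem?_replicate_of_lt (by omega)]
    rfl
  · rw [PySem.List.mem_pyRange_one]
    have := hq.two_le
    omega

lemma filters_eq : pvPrimelist.filter isPrB = (PySem.List.pyRange 2 3163 1).filter isPrB := by
  have hDpw : (PySem.List.pyRange 2 3163 1).Pairwise (· < ·) :=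
    PySem.List.pairwise_lt_pyRange_one 2 3163
  have hPsub : List.Sublist pvPrimelist (PySem.List.pyRange 2 3163 1) := sieve_sublist
  have hPpw : pvPrimelist.Pairwise (· < ·) := hDpw.sublist hPsub
  have h1 : (pvPrimelist.filter isPrB).Pairwise (· < ·) := hPpw.filter _
  have h2 : ((PySem.List.pyRange 2 3163 1).filter isPrB).Pairwise (· < ·) := hDpw.filter _
  have hm : ∀ x, x ∈ pvPrimelist.filter isPrB ↔
      x ∈ (PySem.List.pyRange 2 3163 1).filter isPrB := by
    intro x
    simp only [List.mem_filter]
    constructor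
    · rintro ⟨hx, hpr⟩
      exact ⟨hPsub.subset hx, hpr⟩
    · rintro ⟨hx, hpr⟩
      rw [PySem.List.mem_pyRange_one] at hx
      have hprime : x.natAbs.Prime := isPrB_prime hx.1 hpr
      have hxcast : ((x.natAbs : ℕ) : Int) = x := Int.natAbs_of_nonneg (by omega)
      refine ⟨?_, hpr⟩
      have hc := sieve_complete x.natAbs hprime (by omega)
      rw [hxcast] at hc
      exact hc
  exact ((List.perm_ext_iff_of_nodup (h1.imp ne_of_lt) (h2.imp ne_of_lt)).mpr hm).eq_of_pairwise
    (fun a b _ _ => le_antisymm) (h1.imp le_of_lt) (h2.imp le_of_lt)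

lemma factor_bridge (n : Int) (hn : n ≠ 0) (hb : n.natAbs < 2 ^ 64) :
    oddprimeset n = PySem.Set.ofList (factoroddpow n) := by
  have hDpw : (PySem.List.pyRange 2 3163 1).Pairwise (· < ·) :=
    PySem.List.pairwise_lt_pyRange_one 2 3163
  have hDbd : ∀ d ∈ PySem.List.pyRange 2 3163 1, 2 ≤ d ∧ d < 3163 := by
    intro d hd; rw [PySem.List.mem_pyRange_one] at hd; omega
  have hDinv : PInv (PySem.List.pyRange 2 3163 1) n := by
    intro q hq h3 _
    rw [PySem.List.mem_pyRange_one]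
    have := hq.two_le
    omega
  have hPsub : List.Sublist pvPrimelist (PySem.List.pyRange 2 3163 1) := sieve_sublist
  have hPpw : pvPrimelist.Pairwise (· < ·) := hDpw.sublist hPsub
  have hPbd : ∀ d ∈ pvPrimelist, 2 ≤ d ∧ d < 3163 := fun d hd => hDbd d (hPsub.subset hd)
  have hPinv : PInv pvPrimelist n := fun q hq h3 _ => sieve_complete q hq h3
  have hAB : (PySem.List.pyRange 2 3163 1).foldl stepB ([], n) =
      (PySem.List.pyRange 2 3163 1).foldl stepA ([], n) :=
    fold_AB _ [] n hDpw (fun d hd => (hDbd d hd).1) (by simp) hn hb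
  have hDA : pvPrimelist.foldl stepA ([], n) =
      (PySem.List.pyRange 2 3163 1).foldl stepA ([], n) := by
    rw [fold_filter _ [] n hDpw hDbd hn hb hDinv,
      fold_filter _ [] n hPpw hPbd hn hb hPinv, filters_eq]
  obtain ⟨hpw1, h31, hne1, hinv1⟩ :=
    fold_props (PySem.List.pyRange 2 3163 1) [] n hDpw hDbd (by simp) (by simp) (by simp)
      hn hb hDinv
  rw [oddprimeset_eq, factoroddpow_eq, hAB, hDA]
  generalize hrr : (PySem.List.pyRange 2 3163 1).foldl stepA ([], n) = r
    at hpw1 h31 hne1 hinv1 ⊢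
  unfold finishA finishB
  by_cases hgt : r.2 > 1
  · rw [if_pos hgt, if_pos hgt]
    have hbig : 3163 ≤ r.2 := by
      by_contra hsm
      have hqp : r.2.natAbs.minFac.Prime := Nat.minFac_prime (by omega)
      have hqd : ((r.2.natAbs.minFac : ℕ) : Int) ∣ r.2 := by
        have h1 : ((r.2.natAbs.minFac : ℕ) : Int) ∣ ((r.2.natAbs : ℕ) : Int) :=
          Int.natCast_dvd_natCast.mpr (Nat.minFac_dvd _)
        rwa [Int.natAbs_of_nonneg (by omega)] at h1
      have hql : ((r.2.natAbs.minFac : ℕ) : Int) < 3163 := by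
        have := Nat.minFac_le (n := r.2.natAbs) (by omega)
        omega
      exact absurd (hinv1 _ hqp hql hqd) (List.not_mem_nil)
    have hnotin : r.2 ∉ r.1 := fun hmem => by
      have := h31 _ hmem
      omega
    have hadd : PySem.Set.add r.1 r.2 = r.1 ++ [r.2] := by
      have hc : PySem.Set.contains r.1 r.2 ≠ true :=
        fun h' => hnotin ((PySem.Set.contains_iff _ _).mp h')
      unfold PySem.Set.add
      rw [if_neg hc]
    have hnodup : (r.1 ++ [r.2]).Nodup := by
      refine List.Pairwise.imp ne_of_lt ?_
      rw [List.pairwise_append]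
      refine ⟨hpw1, by simp, ?_⟩
      intro x hx y hy
      rw [List.mem_singleton.mp hy]
      have := h31 x hx
      omega
    rw [hadd, PySem.Set.ofList_eq_self_of_nodup _ hnodup]
  · rw [if_neg hgt, if_neg hgt,
      PySem.Set.ofList_eq_self_of_nodup _ (List.Pairwise.imp ne_of_lt hpw1)]

-- ---- part 2: both main loops compute 2^rank ----

def toF (s : List Int) : Finset Int := s.toFinset

def xorL (l : List (Finset Int)) : Finset Int := l.foldr (fun a b => symmDiff a b) ∅

def InSpan (L : List (Finset Int)) (v : Finset Int) : Prop :=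
  ∃ s : List (Finset Int), s.Sublist L ∧ xorL s = v

noncomputable def rg : List (Finset Int) → List (Finset Int) → Nat
  | _, [] => 0
  | seen, r :: rest =>
    (@ite Nat (InSpan seen r) (Classical.propDecidable _) 0 1) + rg (r :: seen) rest

lemma xorL_nil : xorL [] = ∅ := rfl

lemma xorL_cons (x : Finset Int) (l : List (Finset Int)) :
    xorL (x :: l) = symmDiff x (xorL l) := rfl

lemma rg_nil (seen : List (Finset Int)) : rg seen [] = 0 := rfl

lemma rg_cons (seen : List (Finset Int)) (r : Finset Int) (rest : List (Finset Int)) :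
    rg seen (r :: rest) =
      (@ite Nat (InSpan seen r) (Classical.propDecidable _) 0 1) + rg (r :: seen) rest := rfl

lemma span_zero (L : List (Finset Int)) : InSpan L ∅ := ⟨[], List.nil_sublist _, rfl⟩

lemma span_mem {L : List (Finset Int)} {r : Finset Int} (h : r ∈ L) : InSpan L r :=
  ⟨[r], List.singleton_sublist.mpr h, by simp [xorL_cons, xorL_nil, Finset.bot_eq_empty]⟩

lemma span_cons_of {L : List (Finset Int)} {x v : Finset Int} (h : InSpan L v) :
    InSpan (x :: L) v := by
  obtain ⟨s, hs, hx⟩ := h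
  exact ⟨s, hs.trans (List.sublist_cons_self _ _), hx⟩

lemma span_nil {v : Finset Int} : InSpan [] v ↔ v = ∅ := by
  constructor
  · rintro ⟨s, hs, rfl⟩
    rw [List.sublist_nil.mp hs]; rfl
  · rintro rfl; exact span_zero []

lemma span_add {L : List (Finset Int)} {a b : Finset Int}
    (ha : InSpan L a) (hb : InSpan L b) : InSpan L (symmDiff a b) := by
  obtain ⟨s1, h1, rfl⟩ := ha
  obtain ⟨s2, h2, rfl⟩ := hb
  induction L generalizing s1 s2 with
  | nil =>
    rw [List.sublist_nil.mp h1, List.sublist_nil.mp h2]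
    simpa [xorL_nil, Finset.bot_eq_empty] using span_zero ([] : List (Finset Int))
  | cons x L ih =>
    rcases List.sublist_cons_iff.mp h1 with h1' | ⟨t1, rfl, h1'⟩ <;>
      rcases List.sublist_cons_iff.mp h2 with h2' | ⟨t2, rfl, h2'⟩
    · exact span_cons_of (ih _ h1' _ h2')
    · obtain ⟨s, hs, hx⟩ := ih _ h1' _ h2'
      refine ⟨x :: s, List.cons_sublist_cons.mpr hs, ?_⟩
      rw [xorL_cons, hx, xorL_cons, symmDiff_left_comm]
    · obtain ⟨s, hs, hx⟩ := ih _ h1' _ h2'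
      refine ⟨x :: s, List.cons_sublist_cons.mpr hs, ?_⟩
      rw [xorL_cons, hx, xorL_cons, symmDiff_assoc]
    · obtain ⟨s, hs, hx⟩ := ih _ h1' _ h2'
      refine ⟨s, hs.trans (List.sublist_cons_self _ _), ?_⟩
      rw [hx, xorL_cons, xorL_cons, symmDiff_assoc, symmDiff_left_comm (xorL t1),
        symmDiff_symmDiff_cancel_left]

lemma span_cons_iff {L : List (Finset Int)} {x v : Finset Int} :
    InSpan (x :: L) v ↔ InSpan L v ∨ ∃ w, InSpan L w ∧ v = symmDiff x w := by
  constructor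
  · rintro ⟨s, hs, rfl⟩
    rcases List.sublist_cons_iff.mp hs with hs' | ⟨t, rfl, ht⟩
    · exact Or.inl ⟨s, hs', rfl⟩
    · exact Or.inr ⟨xorL t, ⟨t, ht, rfl⟩, by rw [xorL_cons]⟩
  · rintro (h | ⟨w, ⟨t, ht, rfl⟩, rfl⟩)
    · exact span_cons_of h
    · exact ⟨x :: t, List.cons_sublist_cons.mpr ht, by rw [xorL_cons]⟩

lemma span_le {L1 L2 : List (Finset Int)} (h : ∀ y ∈ L1, InSpan L2 y) :
    ∀ {v}, InSpan L1 v → InSpan L2 v := by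
  rintro v ⟨s, hs, rfl⟩
  have hy : ∀ y ∈ s, InSpan L2 y := fun y hy => h y (hs.subset hy)
  clear hs h
  induction s with
  | nil => exact span_zero L2
  | cons y t ih =>
    rw [xorL_cons]
    exact span_add (hy y (by simp)) (ih (fun z hz => hy z (by simp [hz])))

lemma xorL_not_mem {l : List (Finset Int)} {p : Int} (h : ∀ y ∈ l, p ∉ y) : p ∉ xorL l := by
  induction l with
  | nil => simp [xorL_nil]
  | cons y t ih =>
    rw [xorL_cons]
    intro hm
    rcases Finset.mem_symmDiff.mp hm with ⟨h1, _⟩ | ⟨h1, _⟩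
    · exact h y (by simp) h1
    · exact ih (fun z hz => h z (by simp [hz])) h1

lemma span_not_mem {L : List (Finset Int)} {p : Int} (h : ∀ y ∈ L, p ∉ y)
    {v : Finset Int} (hv : InSpan L v) : p ∉ v := by
  obtain ⟨s, hs, rfl⟩ := hv
  exact xorL_not_mem (fun y hy => h y (hs.subset hy))

lemma span_cons_congr {L : List (Finset Int)} {c : Finset Int} (hc : InSpan L c) :
    ∀ v, InSpan (c :: L) v ↔ InSpan L v := by
  intro v
  constructor
  · intro h
    rcases span_cons_iff.mp h with h' | ⟨w, hw, rfl⟩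
    · exact h'
    · exact span_add hc hw
  · exact span_cons_of

lemma span_cons_equiv {s1 s2 : List (Finset Int)} {x c : Finset Int}
    (hiff : ∀ v, InSpan s1 v ↔ InSpan s2 v) (hc : InSpan s1 c) :
    ∀ v, InSpan (x :: s1) v ↔ InSpan (symmDiff x c :: s2) v := by
  intro v
  constructor
  · intro h
    rcases span_cons_iff.mp h with h' | ⟨w, hw, rfl⟩
    · exact span_cons_of ((hiff v).mp h')
    · refine span_cons_iff.mpr (Or.inr ⟨symmDiff c w, (hiff _).mp (span_add hc hw), ?_⟩)
      rw [symmDiff_assoc, symmDiff_symmDiff_cancel_left]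
  · intro h
    rcases span_cons_iff.mp h with h' | ⟨w, hw, rfl⟩
    · exact span_cons_of ((hiff v).mpr h')
    · refine span_cons_iff.mpr (Or.inr ⟨symmDiff c w, span_add hc ((hiff _).mpr hw), ?_⟩)
      rw [symmDiff_assoc]

lemma forall₂_map {α β : Type} (l : List α) (f g : α → β) (R : β → β → Prop)
    (h : ∀ o ∈ l, R (f o) (g o)) : List.Forall₂ R (l.map f) (l.map g) := by
  induction l with
  | nil => simp
  | cons o t ih =>
    simp only [List.map_cons]
    exact List.Forall₂.cons (h o (by simp)) (ih (fun z hz => h z (by simp [hz])))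

lemma rg_congr {rows1 rows2 seen1 seen2 : List (Finset Int)}
    (hiff : ∀ v, InSpan seen1 v ↔ InSpan seen2 v)
    (hrel : List.Forall₂ (fun x y => ∃ c, InSpan seen1 c ∧ y = symmDiff x c) rows1 rows2) :
    rg seen1 rows1 = rg seen2 rows2 := by
  induction rows1 generalizing rows2 seen1 seen2 with
  | nil =>
    cases hrel
    rfl
  | cons x l1 ih =>
    obtain ⟨_, l2, ⟨c, hc, rfl⟩, htail, rfl⟩ :=
      List.forall₂_cons_left_iff.mp hrel
    rw [rg_cons, rg_cons]
    have hyiff : InSpan seen1 x ↔ InSpan seen2 (symmDiff x c) := by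
      constructor
      · intro h; exact (hiff _).mp (span_add h hc)
      · intro h
        have : InSpan seen1 (symmDiff (symmDiff x c) c) := span_add ((hiff _).mpr h) hc
        rwa [symmDiff_symmDiff_cancel_right] at this
    have htails : rg (x :: seen1) l1 = rg (symmDiff x c :: seen2) l2 :=
      ih (span_cons_equiv hiff hc)
        (htail.imp (fun a b ⟨c', hc', hb⟩ => ⟨c', span_cons_of hc', hb⟩))
    by_cases hx : InSpan seen1 x
    · rw [if_pos hx, if_pos (hyiff.mp hx), htails]
    · rw [if_neg hx, if_neg (fun h => hx (hyiff.mpr h)), htails]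

-- bridges between the concrete PySem.Set operations and Finset
lemma toF_symmDiff (s t : List Int) : toF (PySem.Set.symmDiff s t) = symmDiff (toF s) (toF t) := by
  ext x
  simp [toF, Finset.mem_symmDiff, PySem.Set.mem_symmDiff]

lemma toF_eq_empty {s : List Int} : toF s = ∅ ↔ s = [] := by
  simp [toF, List.toFinset_eq_empty_iff]

lemma mem_toF {s : List Int} {x : Int} : x ∈ toF s ↔ x ∈ s := by simp [toF]

lemma contains_toF {s : List Int} {x : Int} : PySem.Set.contains s x = true ↔ x ∈ toF s := by
  rw [PySem.Set.contains_iff, mem_toF]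

lemma len_eq_zero {s : PySem.Set Int} : (PySem.Set.len s == 0) = true ↔ s = [] := by
  simp [PySem.Set.len]

-- A side: loopA counts a row exactly when it is independent of the earlier rows
lemma lemA (rows : List (PySem.Set Int)) (adjoins : Nat) (seen : List (Finset Int))
    (P : Finset Int)
    (hdisj : ∀ r ∈ rows, ∀ p ∈ P, p ∉ toF r)
    (hpiv : ∀ v, InSpan seen v → v ≠ ∅ → ∃ p ∈ P, p ∈ v) :
    loopA rows adjoins = adjoins + rg seen (rows.map toF) := by
  induction hl : rows.length generalizing rows adjoins seen P with
  | zero =>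
    rw [List.length_eq_zero_iff.mp hl]
    simp [loopA, rg_nil]
  | succ n ih =>
    match rows, hl with
    | factor :: rest, hl =>
      have hlen : rest.length = n := by simpa using hl
      rw [loopA]
      by_cases hemp : (PySem.Set.len factor == 0) = true
      · have hf : factor = [] := len_eq_zero.mp hemp
        subst hf
        rw [if_pos hemp]
        have h0 : toF ([] : List Int) = ∅ := by simp [toF]
        rw [List.map_cons, h0, rg_cons, if_pos (span_zero seen)]
        have hpiv' : ∀ v, InSpan (∅ :: seen) v → v ≠ ∅ → ∃ p ∈ P, p ∈ v := by
          intro v hv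
          exact hpiv v ((span_cons_congr (span_zero seen) v).mp hv)
        rw [ih rest adjoins (∅ :: seen) P (fun r hr => hdisj r (by simp [hr])) hpiv' hlen]
        omega
      · rw [if_neg hemp]
        have hfne : factor ≠ [] := by
          intro h; exact hemp (len_eq_zero.mpr h)
        have hsample : factor.headI ∈ toF factor := by
          rw [mem_toF]
          cases factor with
          | nil => exact absurd rfl hfne
          | cons a t => simp [List.headI]
        set sample := factor.headI with hsdef
        have hFne : toF factor ≠ ∅ := fun h => hfne (toF_eq_empty.mp h)
        have hnotspan : ¬ InSpan seen (toF factor) := by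
          intro h
          obtain ⟨p, hpP, hpf⟩ := hpiv _ h hFne
          exact hdisj factor (by simp) p hpP hpf
        rw [List.map_cons, rg_cons, if_neg hnotspan]
        set elim := fun o : PySem.Set Int =>
          if PySem.Set.contains o sample then PySem.Set.symmDiff o factor else o with helim
        have hdisj' : ∀ r ∈ rest.map elim, ∀ q ∈ insert sample P, q ∉ toF r := by
          intro r hr q hq
          obtain ⟨o, ho, rfl⟩ := List.mem_map.mp hr
          simp only [helim]
          rcases Finset.mem_insert.mp hq with rfl | hqP
          · by_cases hc : PySem.Set.contains o sample = true
            · rw [if_pos hc, toF_symmDiff]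
              intro hmem
              rcases Finset.mem_symmDiff.mp hmem with ⟨_, h2⟩ | ⟨_, h2⟩
              · exact h2 hsample
              · exact h2 (contains_toF.mp hc)
            · rw [if_neg hc]
              intro hmem
              exact hc (contains_toF.mpr hmem)
          · have hpo : q ∉ toF o := hdisj o (by simp [ho]) q hqP
            have hpf : q ∉ toF factor := hdisj factor (by simp) q hqP
            by_cases hc : PySem.Set.contains o sample = true
            · rw [if_pos hc, toF_symmDiff]
              intro hmem
              rcases Finset.mem_symmDiff.mp hmem with ⟨h1, _⟩ | ⟨h1, _⟩
              · exact hpo h1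
              · exact hpf h1
            · rw [if_neg hc]
              exact hpo
        have hpiv' : ∀ v, InSpan (toF factor :: seen) v → v ≠ ∅ →
            ∃ p ∈ insert sample P, p ∈ v := by
          intro v hv hvne
          rcases span_cons_iff.mp hv with h' | ⟨w, hw, rfl⟩
          · obtain ⟨p, hpP, hpv⟩ := hpiv v h' hvne
            exact ⟨p, Finset.mem_insert_of_mem hpP, hpv⟩
          · by_cases hw0 : w = ∅
            · subst hw0
              refine ⟨sample, Finset.mem_insert_self _ _, ?_⟩
              rw [← Finset.bot_eq_empty, symmDiff_bot]
              exact hsample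
            · obtain ⟨p, hpP, hpw⟩ := hpiv w hw hw0
              have hpf : p ∉ toF factor := hdisj factor (by simp) p hpP
              exact ⟨p, Finset.mem_insert_of_mem hpP,
                Finset.mem_symmDiff.mpr (Or.inr ⟨hpw, hpf⟩)⟩
        have hIH := ih (rest.map elim) (adjoins + 1) (toF factor :: seen) (insert sample P)
          hdisj' hpiv' (by simp [hlen])
        rw [hIH]
        have hcg : rg (toF factor :: seen) ((rest.map elim).map toF) =
            rg (toF factor :: seen) (rest.map toF) := by
          rw [List.map_map]
          refine rg_congr (fun v => Iff.rfl) (forall₂_map rest _ _ _ ?_)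
          intro o _
          simp only [Function.comp_apply, helim]
          by_cases hc : PySem.Set.contains o sample = true
          · refine ⟨toF factor, span_mem (by simp), ?_⟩
            rw [if_pos hc, toF_symmDiff, symmDiff_assoc, symmDiff_self, symmDiff_bot]
          · refine ⟨∅, span_zero _, ?_⟩
            rw [if_neg hc, ← Finset.bot_eq_empty, symmDiff_bot]
        rw [hcg]
        omega

-- B side
def GoodBasis (bl : List (Int × PySem.Set Int)) : Prop :=
  (∀ e ∈ bl, e.1 ∈ toF e.2) ∧
  List.Pairwise (fun e f : Int × PySem.Set Int => e.1 ∉ toF f.2 ∧ f.1 ∉ toF e.2) bl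

def vecs (bl : List (Int × PySem.Set Int)) : List (Finset Int) := bl.map (fun e => toF e.2)

lemma lemRed (bl : List (Int × PySem.Set Int)) (s : PySem.Set Int) (hg : GoodBasis bl) :
    ∃ c, InSpan (vecs bl) c ∧ toF (reduceRow bl s) = symmDiff (toF s) c ∧
      ∀ e ∈ bl, e.1 ∉ toF (reduceRow bl s) := by
  induction bl generalizing s with
  | nil =>
    refine ⟨∅, span_zero _, ?_, by simp⟩
    rw [← Finset.bot_eq_empty, symmDiff_bot]; rfl
  | cons e t ih =>
    obtain ⟨hown, hpw⟩ := hg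
    have hgt : GoodBasis t := ⟨fun f hf => hown f (by simp [hf]), hpw.of_cons⟩
    have hhead : ∀ f ∈ t, e.1 ∉ toF f.2 ∧ f.1 ∉ toF e.2 := (List.pairwise_cons.mp hpw).1
    have hrr : reduceRow (e :: t) s = reduceRow t
        (if PySem.Set.contains s e.1 then PySem.Set.symmDiff s e.2 else s) := rfl
    set s' := if PySem.Set.contains s e.1 then PySem.Set.symmDiff s e.2 else s with hs'
    obtain ⟨c', hc', hred, hfree⟩ := ih s' hgt
    have hbase : ∃ b, InSpan (vecs (e :: t)) b ∧ toF s' = symmDiff (toF s) b ∧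
        (PySem.Set.contains s e.1 = true → e.1 ∉ toF s') := by
      by_cases hc : PySem.Set.contains s e.1 = true
      · refine ⟨toF e.2, span_mem (by simp [vecs]), ?_, ?_⟩
        · rw [hs', if_pos hc, toF_symmDiff]
        · intro _
          rw [hs', if_pos hc, toF_symmDiff]
          intro hm
          rcases Finset.mem_symmDiff.mp hm with ⟨_, h2⟩ | ⟨_, h2⟩
          · exact h2 (hown e (by simp))
          · exact h2 (contains_toF.mp hc)
      · refine ⟨∅, span_zero _, ?_, fun h => absurd h hc⟩
        rw [hs', if_neg hc, ← Finset.bot_eq_empty, symmDiff_bot]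
    obtain ⟨b, hbspan, hsb, hbfree⟩ := hbase
    refine ⟨symmDiff b c', span_add hbspan (span_le (fun y hy => span_cons_of (span_mem hy)) hc'), ?_, ?_⟩
    · rw [hrr, hred, hsb, symmDiff_assoc]
    · intro f hf
      rcases List.mem_cons.mp hf with rfl | hft
      · rw [hrr, hred]
        have he1s' : f.1 ∉ toF s' := by
          by_cases hc : PySem.Set.contains s f.1 = true
          · exact hbfree hc
          · rw [hs', if_neg hc]
            exact fun h => hc (contains_toF.mpr h)
        have he1c' : f.1 ∉ c' := by
          refine span_not_mem ?_ hc'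
          intro y hy
          obtain ⟨g, hg, rfl⟩ := List.mem_map.mp hy
          exact (hhead g hg).1
        intro hm
        rcases Finset.mem_symmDiff.mp hm with ⟨h1, _⟩ | ⟨h1, _⟩
        · exact he1s' h1
        · exact he1c' h1
      · rw [hrr]
        exact hfree f hft

lemma lemPiv (bl : List (Int × PySem.Set Int)) (hg : GoodBasis bl) :
    ∀ v, InSpan (vecs bl) v → v ≠ ∅ → ∃ e ∈ bl, e.1 ∈ v := by
  rintro v ⟨sub, hsub, rfl⟩ hne
  obtain ⟨sub', hsub', rfl⟩ := List.sublist_map_iff.mp hsub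
  cases sub' with
  | nil => exact absurd rfl hne
  | cons e t =>
    have hmem : e ∈ bl := (hsub'.subset) (by simp)
    have hpw : (e :: t).Pairwise
        (fun e f : Int × PySem.Set Int => e.1 ∉ toF f.2 ∧ f.1 ∉ toF e.2) :=
      hg.2.sublist hsub'
    refine ⟨e, hmem, ?_⟩
    rw [List.map_cons, xorL_cons]
    refine Finset.mem_symmDiff.mpr (Or.inl ⟨hg.1 e hmem, ?_⟩)
    refine xorL_not_mem ?_
    intro y hy
    obtain ⟨g, hgt, rfl⟩ := List.mem_map.mp hy
    exact ((List.pairwise_cons.mp hpw).1 g hgt).1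

lemma lemB (items : List Int) (bl : List (Int × PySem.Set Int)) (seen : List (Finset Int))
    (hg : GoodBasis bl)
    (hspan : ∀ w, InSpan (vecs bl) w ↔ InSpan seen w) :
    (loopB items bl).length =
      bl.length + rg seen (items.map (fun it => toF (oddprimeset it))) := by
  induction items generalizing bl seen with
  | nil => simp [loopB, rg_nil]
  | cons item rest ih =>
    rw [loopB]
    set s0 : PySem.Set Int := oddprimeset item with hs0
    set s' := reduceRow bl s0 with hs'd
    obtain ⟨c, hcspan, hredF, hfree⟩ := lemRed bl s0 hg
    rw [List.map_cons, rg_cons]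
    by_cases hemp : (PySem.Set.len s' == 0) = true
    · have hse : s' = [] := len_eq_zero.mp hemp
      have hsF : toF s0 = c := by
        have : symmDiff (toF s0) c = ∅ := by rw [← hredF, ← hs'd, hse]; rfl
        rw [← Finset.bot_eq_empty, symmDiff_eq_bot] at this
        exact this
      have hins : InSpan seen (toF s0) := (hspan _).mp (hsF ▸ hcspan)
      rw [if_pos hemp, if_pos hins]
      have hspan' : ∀ w, InSpan (vecs bl) w ↔ InSpan (toF s0 :: seen) w := by
        intro w
        rw [hspan w, Iff.comm]
        exact span_cons_congr hins w
      rw [ih bl (toF s0 :: seen) hg hspan']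
      simp only [← hs0]
      omega
    · rw [if_neg hemp]
      have hsne : s' ≠ [] := fun h => hemp (len_eq_zero.mpr h)
      have hsFne : toF s' ≠ ∅ := fun h => hsne (toF_eq_empty.mp h)
      have hpmem : ((PySem.List.min? s' (fun x => x)).getD 0) ∈ toF s' := by
        rcases hmn : PySem.List.min? s' (fun x : Int => x) with _ | m
        · exact absurd ((PySem.List.min?_eq_none_iff s' _).mp hmn) hsne
        · rw [mem_toF]
          simpa [hmn] using PySem.List.min?_mem hmn
      set p := (PySem.List.min? s' (fun x => x)).getD 0 with hpd
      set upd := fun e : Int × PySem.Set Int =>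
        (e.1, if PySem.Set.contains e.2 p then PySem.Set.symmDiff e.2 s' else e.2) with hupd
      set bl' := bl.map upd ++ [(p, s')] with hbl'
      have hnotspan : ¬ InSpan seen (toF s0) := by
        intro h
        have hs'span : InSpan (vecs bl) (toF s') := by
          rw [hredF]
          exact span_add ((hspan _).mpr h) hcspan
        obtain ⟨e, he, hpe⟩ := lemPiv bl hg _ hs'span hsFne
        exact hfree e he hpe
      rw [if_neg hnotspan]
      have hfst : ∀ e : Int × PySem.Set Int, (upd e).1 = e.1 := fun e => rfl
      have hsndF : ∀ e : Int × PySem.Set Int, PySem.Set.contains e.2 p = true →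
          toF (upd e).2 = symmDiff (toF e.2) (toF s') := by
        intro e hc
        simp only [hupd, if_pos hc]
        exact toF_symmDiff _ _
      have hsndN : ∀ e : Int × PySem.Set Int, ¬ PySem.Set.contains e.2 p = true →
          (upd e).2 = e.2 := by
        intro e hc
        simp only [hupd, if_neg hc]
      have hg' : GoodBasis bl' := by
        constructor
        · intro e' he'
          rcases List.mem_append.mp he' with hm | hm
          · obtain ⟨e, he, rfl⟩ := List.mem_map.mp hm
            by_cases hc : PySem.Set.contains e.2 p = true
            · rw [hfst, hsndF e hc]
              exact Finset.mem_symmDiff.mpr (Or.inl ⟨hg.1 e he, hfree e he⟩)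
            · rw [hfst, hsndN e hc]
              exact hg.1 e he
          · rw [List.mem_singleton.mp hm]
            exact hpmem
        · rw [List.pairwise_append]
          refine ⟨?_, by simp, ?_⟩
          · rw [List.pairwise_map]
            refine hg.2.imp_of_mem ?_
            intro e f he hf ⟨h1, h2⟩
            constructor
            · rw [hfst]
              by_cases hc : PySem.Set.contains f.2 p = true
              · rw [hsndF f hc]
                intro hm
                rcases Finset.mem_symmDiff.mp hm with ⟨hx, _⟩ | ⟨hx, _⟩
                · exact h1 hx
                · exact hfree e he hx
              · rw [hsndN f hc]; exact h1
            · rw [hfst]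
              by_cases hc : PySem.Set.contains e.2 p = true
              · rw [hsndF e hc]
                intro hm
                rcases Finset.mem_symmDiff.mp hm with ⟨hx, _⟩ | ⟨hx, _⟩
                · exact h2 hx
                · exact hfree f hf hx
              · rw [hsndN e hc]; exact h2
          · intro x hx y hy
            obtain ⟨e, he, rfl⟩ := List.mem_map.mp hx
            rw [List.mem_singleton.mp hy]
            constructor
            · rw [hfst]
              exact hfree e he
            · by_cases hc : PySem.Set.contains e.2 p = true
              · rw [hsndF e hc]
                intro hm
                rcases Finset.mem_symmDiff.mp hm with ⟨_, h2⟩ | ⟨_, h2⟩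
                · exact h2 hpmem
                · exact h2 (contains_toF.mp hc)
              · rw [hsndN e hc]
                exact fun h => hc (contains_toF.mpr h)
      have hvecs' : vecs bl' = (bl.map upd).map (fun e => toF e.2) ++ [toF s'] := by
        simp [vecs, hbl']
      have holdle : ∀ y ∈ vecs bl, InSpan (vecs bl') y := by
        intro y hy
        obtain ⟨e, he, rfl⟩ := List.mem_map.mp hy
        by_cases hc : PySem.Set.contains e.2 p = true
        · have h1 : toF (upd e).2 ∈ vecs bl' := by
            rw [hvecs']
            exact List.mem_append.mpr (Or.inl (List.mem_map.mpr ⟨upd e, List.mem_map.mpr ⟨e, he, rfl⟩, rfl⟩))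
          have h2 : toF s' ∈ vecs bl' := by
            rw [hvecs']; simp
          have := span_add (span_mem h1) (span_mem h2)
          rwa [hsndF e hc, symmDiff_assoc, symmDiff_self, symmDiff_bot] at this
        · refine span_mem ?_
          rw [hvecs']
          refine List.mem_append.mpr (Or.inl (List.mem_map.mpr ⟨upd e, List.mem_map.mpr ⟨e, he, rfl⟩, ?_⟩))
          rw [hsndN e hc]
      have hspan' : ∀ w, InSpan (vecs bl') w ↔ InSpan (toF s0 :: seen) w := by
        intro w
        constructor
        · refine span_le ?_
          intro y hy
          rw [hvecs'] at hy
          rcases List.mem_append.mp hy with hm | hm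
          · obtain ⟨e', he', rfl⟩ := List.mem_map.mp hm
            obtain ⟨e, he, rfl⟩ := List.mem_map.mp he'
            have hold : InSpan (toF s0 :: seen) (toF e.2) :=
              span_cons_of ((hspan _).mp (span_mem (List.mem_map.mpr ⟨e, he, rfl⟩)))
            have hs'span : InSpan (toF s0 :: seen) (toF s') := by
              rw [hredF]
              exact span_add (span_mem (by simp)) (span_cons_of ((hspan _).mp hcspan))
            by_cases hc : PySem.Set.contains e.2 p = true
            · rw [hsndF e hc]
              exact span_add hold hs'span
            · rw [hsndN e hc]
              exact hold
          · rw [List.mem_singleton.mp hm, hredF]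
            exact span_add (span_mem (by simp)) (span_cons_of ((hspan _).mp hcspan))
        · refine span_le ?_
          intro y hy
          have hnewle : ∀ z, InSpan (vecs bl) z → InSpan (vecs bl') z := fun z hz => span_le holdle hz
          rcases List.mem_cons.mp hy with rfl | hseen
          · have h1 : InSpan (vecs bl') (toF s') := by
              refine span_mem ?_
              rw [hvecs']; simp
            have h2 : InSpan (vecs bl') c := hnewle _ hcspan
            have := span_add h1 h2
            have hs0c : symmDiff (toF s') c = toF s0 := by
              rw [hredF, symmDiff_assoc, symmDiff_self, symmDiff_bot]
            rwa [hs0c] at this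
          · exact hnewle _ ((hspan _).mpr (span_mem hseen))
      have hIH := ih bl' (toF s0 :: seen) hg' hspan'
      rw [hIH, hbl']
      simp only [List.length_append, List.length_map, List.length_singleton, ← hs0]
      omega

lemma countEq (a : List Int) (h : ∀ x ∈ a, x ≠ 0 ∧ x.natAbs < 2 ^ 64) :
    loopA (a.map (fun item => PySem.Set.ofList (factoroddpow item))) 0 = (loopB a []).length := by
  have hA := lemA (a.map (fun item => PySem.Set.ofList (factoroddpow item))) 0 [] ∅
    (by simp)
    (by
      intro v hv hne
      exact absurd (span_nil.mp hv) hne)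
  have hB := lemB a [] [] ⟨by simp, List.Pairwise.nil⟩
    (by intro w; exact Iff.rfl)
  rw [hA, hB, List.map_map]
  have hmaps : a.map (toF ∘ fun item => PySem.Set.ofList (factoroddpow item)) =
      a.map (fun it => toF (oddprimeset it)) := by
    refine List.map_congr_left ?_
    intro x hx
    simp only [Function.comp_apply]
    rw [factor_bridge x (h x hx).1 (h x hx).2]
  rw [hmaps]
  simp

-- ===== VERDICT (by name: the statement is the Claim_ definition above) =====
theorem mindegree_spec : Claim_equal_mindegree := by
  intro a hdom hpre
  show mindegree a = mindegree_alt a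
  unfold mindegree mindegree_alt
  rw [countEq]
  intro x hx
  refine ⟨fun h0 => hpre (h0 ▸ hx), ?_⟩
  have : pvDomInt x = true := by
    rw [Dom_mindegree, List.all_eq_true] at hdom
    exact hdom x hx
  rw [pvDomInt, decide_eq_true_iff] at this
  have h64 : (2:ℕ) ^ 64 = 18446744073709551616 := by norm_num
  omega
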